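-- pv_equiv track=rewrite | github.com/Likelyt/Text-Generation | baseline1_seq2seq/match_data_3.py | Match_data_pair
-- ===== SOURCE A (Python) =====
-- def Match_data_pair(text, l, sentence_0, sentence_1, sentence_2, sentence_3):
--
--     # Convert all text sentence large than 4 to 4
--     for i in range(len(l)):
--         if l[i] > 4:
--             l[i] = 4
--
--     data_0 = []
--     data_1 = []
--     i = 0
--     j = 0
--     k = 0
--     s = 0
--     for i in range(len(l)):
--         if l[i] == 1:
--             data_0.append([sentence_0[i]])
--         if l[i] == 2:
--             data_0.append([sentence_0[i]])
--             data_1.append([sentence_0[i], sentence_1[j]])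
--             j += 1
--         if l[i] == 3:
--             data_0.append([sentence_0[i]])
--             data_1.append([sentence_0[i], sentence_1[j]])
--             data_1.append([sentence_1[j], sentence_2[k]])
--             j += 1
--             k += 1
--         if l[i] == 4:
--             data_0.append([sentence_0[i]])
--             data_1.append([sentence_0[i], sentence_1[j]])
--             data_1.append([sentence_1[j], sentence_2[k]])
--             data_1.append([sentence_2[k], sentence_3[s]])
--             j += 1
--             k += 1
--             s += 1
--
--     return data_0, data_1
-- ===== SOURCE B (Python) =====
-- def _pairs_at(c, i, off, sentence_0, sentence_1, sentence_2, sentence_3):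
--     j, k, s = off
--     pairs = []
--     if c >= 2:
--         pairs.append([sentence_0[i], sentence_1[j]])
--     if c >= 3:
--         pairs.append([sentence_1[j], sentence_2[k]])
--     if c >= 4:
--         pairs.append([sentence_2[k], sentence_3[s]])
--     return pairs
--
--
-- def Match_data_pair(text, l, sentence_0, sentence_1, sentence_2, sentence_3):
--     # Same in-place capping of l as the original (callers observe mutated l)
--     for i in range(len(l)):
--         if l[i] > 4:
--             l[i] = 4
--     # Stage 1: tabulate, for each position, how many EARLIER codes reach levels 2/3/4
--     # (these prefix counts are exactly the offsets into sentence_1/2/3 used there).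
--     pre = []
--     q2 = q3 = q4 = 0
--     for c in l:
--         pre.append((q2, q3, q4))
--         if c >= 2:
--             q2 += 1
--         if c >= 3:
--             q3 += 1
--         if c >= 4:
--             q4 += 1
--     # Stage 2: stateless comprehensions — each position is handled independently
--     # using the precomputed offsets, no running counters.
--     data_0 = [[sentence_0[i]] for i in range(len(l)) if 1 <= l[i] <= 4]
--     data_1 = [p for i in range(len(l))
--               for p in _pairs_at(l[i], i, pre[i], sentence_0, sentence_1, sentence_2, sentence_3)]
--     return data_0, data_1
-- ===== Notes on version B (the rewrite author's own statement) =====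
-- stated objective: alternative
-- what changed: Replaces A's single stateful pass (running counters j/k/s mutated inside four unrolled per-code branches) by two staged passes: a first pass tabulates per-position prefix counts of codes reaching levels 2/3/4, then stateless comprehensions emit data_0 and data_1 independently per position using those precomputed offsets; same in-place capping of l.
import Mathlib
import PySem

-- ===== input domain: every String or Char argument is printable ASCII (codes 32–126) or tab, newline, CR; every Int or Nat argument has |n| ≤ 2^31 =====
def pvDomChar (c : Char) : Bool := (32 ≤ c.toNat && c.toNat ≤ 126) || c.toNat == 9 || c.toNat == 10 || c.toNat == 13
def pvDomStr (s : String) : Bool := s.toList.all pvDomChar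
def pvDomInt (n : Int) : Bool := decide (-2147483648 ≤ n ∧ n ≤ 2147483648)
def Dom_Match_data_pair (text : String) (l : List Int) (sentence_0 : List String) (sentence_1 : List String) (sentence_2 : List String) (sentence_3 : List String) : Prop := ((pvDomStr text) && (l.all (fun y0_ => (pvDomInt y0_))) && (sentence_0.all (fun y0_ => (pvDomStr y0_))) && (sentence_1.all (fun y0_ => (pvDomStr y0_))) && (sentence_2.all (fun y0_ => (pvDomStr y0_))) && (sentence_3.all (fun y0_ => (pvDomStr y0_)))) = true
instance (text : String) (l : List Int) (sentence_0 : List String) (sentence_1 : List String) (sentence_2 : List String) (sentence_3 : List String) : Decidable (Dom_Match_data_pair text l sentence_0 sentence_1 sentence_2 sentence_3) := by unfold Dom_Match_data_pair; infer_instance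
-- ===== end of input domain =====

-- B replaces A's single stateful counter-driven pass by two staged passes (a prefix-count table, then
-- stateless per-position comprehensions); an alternative of the same cost. Both A and B mutate l in
-- place (capping codes > 4 to 4) identically; the equivalence proved is about the return value.


-- ===== PORT A =====
-- xs[i] where Python may raise IndexError: Pre_ excludes the out-of-range accesses; the "" default is never reached inside Pre_.
def pvGet (xs : List String) (i : Int) : String := PySem.List.pyGetD xs i ""

def pvStepA (l' : List Int) (s0 s1 s2 s3 : List String)
    (st : List (List String) × List (List String) × Int × Int × Int) (i : Int) :
    List (List String) × List (List String) × Int × Int × Int :=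
  let c := PySem.List.pyGetD l' i 0
  let st := if c = 1 then (st.1 ++ [[pvGet s0 i]], st.2.1, st.2.2.1, st.2.2.2.1, st.2.2.2.2) else st
  let st := if c = 2 then (st.1 ++ [[pvGet s0 i]], st.2.1 ++ [[pvGet s0 i, pvGet s1 st.2.2.1]], st.2.2.1 + 1, st.2.2.2.1, st.2.2.2.2) else st
  let st := if c = 3 then (st.1 ++ [[pvGet s0 i]], st.2.1 ++ [[pvGet s0 i, pvGet s1 st.2.2.1], [pvGet s1 st.2.2.1, pvGet s2 st.2.2.2.1]], st.2.2.1 + 1, st.2.2.2.1 + 1, st.2.2.2.2) else st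
  let st := if c = 4 then (st.1 ++ [[pvGet s0 i]], st.2.1 ++ [[pvGet s0 i, pvGet s1 st.2.2.1], [pvGet s1 st.2.2.1, pvGet s2 st.2.2.2.1], [pvGet s2 st.2.2.2.1, pvGet s3 st.2.2.2.2]], st.2.2.1 + 1, st.2.2.2.1 + 1, st.2.2.2.2 + 1) else st
  st

def Match_data_pair (text : String) (l : List Int) (sentence_0 : List String) (sentence_1 : List String) (sentence_2 : List String) (sentence_3 : List String) : List (List String) × List (List String) :=
  -- the in-place capping loop "for i: if l[i] > 4: l[i] = 4" leaves l as this per-element map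
  let l' := l.map (fun x => if x > 4 then 4 else x)
  let st := (PySem.List.pyRange 0 (l.length : Int) 1).foldl (pvStepA l' sentence_0 sentence_1 sentence_2 sentence_3) ([], [], 0, 0, 0)
  (st.1, st.2.1)

-- ===== PORT B =====
-- _pairs_at(c, i, (j,k,s), …): the pair block a single position contributes, from precomputed offsets
def pvPairsAt (c : Int) (i : Int) (off : Int × Int × Int) (s0 s1 s2 s3 : List String) : List (List String) :=
  let pairs : List (List String) := []
  let pairs := if 2 ≤ c then pairs ++ [[pvGet s0 i, pvGet s1 off.1]] else pairs
  let pairs := if 3 ≤ c then pairs ++ [[pvGet s1 off.1, pvGet s2 off.2.1]] else pairs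
  let pairs := if 4 ≤ c then pairs ++ [[pvGet s2 off.2.1, pvGet s3 off.2.2]] else pairs
  pairs

-- stage-1 loop body: append the current (q2,q3,q4), then bump each level the code reaches
def pvPreStep (st : List (Int × Int × Int) × Int × Int × Int) (c : Int) :
    List (Int × Int × Int) × Int × Int × Int :=
  (st.1 ++ [(st.2.1, st.2.2.1, st.2.2.2)],
   st.2.1 + (if 2 ≤ c then 1 else 0),
   st.2.2.1 + (if 3 ≤ c then 1 else 0),
   st.2.2.2 + (if 4 ≤ c then 1 else 0))

def Match_data_pair_alt (text : String) (l : List Int) (sentence_0 : List String) (sentence_1 : List String) (sentence_2 : List String) (sentence_3 : List String) : List (List String) × List (List String) :=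
  let l' := l.map (fun x => if x > 4 then 4 else x)
  let pre := (l'.foldl pvPreStep ([], 0, 0, 0)).1
  let data0 := ((PySem.List.pyRange 0 (l.length : Int) 1).filter
      (fun i => decide (1 ≤ PySem.List.pyGetD l' i 0) && decide (PySem.List.pyGetD l' i 0 ≤ 4))).map
      (fun i => [pvGet sentence_0 i])
  let data1 := (PySem.List.pyRange 0 (l.length : Int) 1).flatMap
      (fun i => pvPairsAt (PySem.List.pyGetD l' i 0) i (PySem.List.pyGetD pre i (0, 0, 0)) sentence_0 sentence_1 sentence_2 sentence_3)
  (data0, data1)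

-- ===== PRECONDITION & SPEC =====
-- Pre_ excludes exactly the inputs on which Python A raises IndexError: a code l[i] ≥ 1 at a
-- position i with no sentence_0[i], or more codes ≥ 2 / ≥ 3 / ≥ 4 than sentence_1/2/3 provide.
def Pre_Match_data_pair (text : String) (l : List Int) (sentence_0 : List String) (sentence_1 : List String) (sentence_2 : List String) (sentence_3 : List String) : Prop :=
  (∀ i : Nat, i < l.length → 1 ≤ l.getD i 0 → i < sentence_0.length) ∧
  l.countP (fun c => 2 ≤ c) ≤ sentence_1.length ∧
  l.countP (fun c => 3 ≤ c) ≤ sentence_2.length ∧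
  l.countP (fun c => 4 ≤ c) ≤ sentence_3.length
instance (text : String) (l : List Int) (sentence_0 : List String) (sentence_1 : List String) (sentence_2 : List String) (sentence_3 : List String) : Decidable (Pre_Match_data_pair text l sentence_0 sentence_1 sentence_2 sentence_3) := by unfold Pre_Match_data_pair; infer_instance

def pvWitness_Match_data_pair : String × List Int × List String × List String × List String × List String :=
  ("", [2, 1], ["a", "b"], ["c"], [], [])

def Spec_Match_data_pair (text : String) (l : List Int) (sentence_0 : List String) (sentence_1 : List String) (sentence_2 : List String) (sentence_3 : List String) (out : List (List String) × List (List String)) : Prop := out = Match_data_pair_alt text l sentence_0 sentence_1 sentence_2 sentence_3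
instance (text : String) (l : List Int) (sentence_0 : List String) (sentence_1 : List String) (sentence_2 : List String) (sentence_3 : List String) (out : List (List String) × List (List String)) : Decidable (Spec_Match_data_pair text l sentence_0 sentence_1 sentence_2 sentence_3 out) := by unfold Spec_Match_data_pair; infer_instance

-- ===== CLAIM (what is proved, stated in full; the proofs are below) =====
def Claim_equal_Match_data_pair : Prop := ∀ (text : String) (l : List Int) (sentence_0 : List String) (sentence_1 : List String) (sentence_2 : List String) (sentence_3 : List String), Dom_Match_data_pair text l sentence_0 sentence_1 sentence_2 sentence_3 → Pre_Match_data_pair text l sentence_0 sentence_1 sentence_2 sentence_3 → Spec_Match_data_pair text l sentence_0 sentence_1 sentence_2 sentence_3 (Match_data_pair text l sentence_0 sentence_1 sentence_2 sentence_3)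

-- ===== LEMMAS AND PROOFS =====
-- running level-count of a prefix, as the Int the counters hold
def pvCnt (k : Int) (t : List Int) : Int := (t.countP (fun c => k ≤ c) : Int)

-- reference shape of stage-1's table
def pvTbl : List Int → Int → Int → Int → List (Int × Int × Int)
  | [], _, _, _ => []
  | x :: t, a, b, c =>
      (a, b, c) :: pvTbl t (a + (if 2 ≤ x then 1 else 0)) (b + (if 3 ≤ x then 1 else 0)) (c + (if 4 ≤ x then 1 else 0))

theorem pvPreStep_foldl (L : List Int) : ∀ (tbl : List (Int × Int × Int)) (a b c : Int),
    L.foldl pvPreStep (tbl, a, b, c) = (tbl ++ pvTbl L a b c, a + pvCnt 2 L, b + pvCnt 3 L, c + pvCnt 4 L) := by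
  induction L with
  | nil => intro tbl a b c; simp [pvTbl, pvCnt]
  | cons x t ih =>
      intro tbl a b c
      simp only [List.foldl_cons, pvPreStep, pvTbl, pvCnt, List.countP_cons]
      rw [ih]
      simp only [Prod.mk.injEq, decide_eq_true_eq, pvCnt]
      refine ⟨by simp, ?_, ?_, ?_⟩ <;> (push_cast; split_ifs <;> omega)

theorem pvTbl_getD (L : List Int) : ∀ (a b c : Int) (m : Nat), m < L.length →
    (pvTbl L a b c).getD m (0, 0, 0) = (a + pvCnt 2 (L.take m), b + pvCnt 3 (L.take m), c + pvCnt 4 (L.take m)) := by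
  induction L with
  | nil => intro _ _ _ m hm; simp at hm
  | cons x t ih =>
      intro a b c m hm
      cases m with
      | zero => simp [pvTbl, pvCnt]
      | succ m =>
          simp only [pvTbl, List.getD_cons_succ, List.take_succ_cons]
          rw [ih _ _ _ m (by simpa using hm)]
          simp only [pvCnt, List.countP_cons]
          simp only [Prod.mk.injEq, decide_eq_true_eq]
          refine ⟨?_, ?_, ?_⟩ <;> (push_cast; split_ifs <;> omega)

theorem pvGetD_mem_of_lt (L : List Int) (m : Nat) (d : Int) (h : m < L.length) : L.getD m d ∈ L := by
  rw [List.getD_eq_getElem _ _ h]; exact List.getElem_mem h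

theorem pvCnt_take_succ (k : Int) (L : List Int) (m : Nat) (hm : m < L.length) :
    pvCnt k (L.take (m + 1)) = pvCnt k (L.take m) + (if k ≤ L.getD m 0 then 1 else 0) := by
  rw [List.take_add_one]
  have : L[m]? = some (L.getD m 0) := by
    rw [List.getD_eq_getElem _ _ hm]; exact List.getElem?_eq_getElem hm
  rw [this]
  simp only [pvCnt, Option.toList_some, List.countP_append, List.countP_singleton, decide_eq_true_eq]
  push_cast
  split_ifs <;> omega

theorem pvMain (L : List Int) (s0 s1 s2 s3 : List String) (hcap : ∀ x ∈ L, x ≤ 4)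
    (m : Nat) (hm : m ≤ L.length) :
    (PySem.List.pyRange 0 (m : Int) 1).foldl (pvStepA L s0 s1 s2 s3) ([], [], 0, 0, 0) =
      (((PySem.List.pyRange 0 (m : Int) 1).filter
          (fun i => decide (1 ≤ PySem.List.pyGetD L i 0) && decide (PySem.List.pyGetD L i 0 ≤ 4))).map
          (fun i => [pvGet s0 i]),
       (PySem.List.pyRange 0 (m : Int) 1).flatMap
          (fun i => pvPairsAt (PySem.List.pyGetD L i 0) i (PySem.List.pyGetD (pvTbl L 0 0 0) i (0, 0, 0)) s0 s1 s2 s3),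
       pvCnt 2 (L.take m), pvCnt 3 (L.take m), pvCnt 4 (L.take m)) := by
  induction m with
  | zero => simp [PySem.List.pyRange, pvCnt]
  | succ m ih =>
      have hm' : m ≤ L.length := Nat.le_of_succ_le hm
      have hmlt : m < L.length := hm
      have hrange : PySem.List.pyRange 0 ((m + 1 : Nat) : Int) 1 = PySem.List.pyRange 0 (m : Int) 1 ++ [(m : Int)] := by
        push_cast
        exact PySem.List.pyRange_one_succ_right (by positivity)
      rw [hrange, List.foldl_append, ih hm', List.filter_append, List.map_append, List.flatMap_append]
      have hgL : PySem.List.pyGetD L (m : Int) 0 = L.getD m 0 := PySem.List.pyGetD_natCast L m 0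
      have hgP : PySem.List.pyGetD (pvTbl L 0 0 0) (m : Int) (0, 0, 0) =
          (pvCnt 2 (L.take m), pvCnt 3 (L.take m), pvCnt 4 (L.take m)) := by
        rw [PySem.List.pyGetD_natCast, pvTbl_getD L 0 0 0 m hmlt]; simp
      have hcapm : L.getD m 0 ≤ 4 := hcap _ (pvGetD_mem_of_lt _ _ _ hmlt)
      rw [pvCnt_take_succ 2 L m hmlt, pvCnt_take_succ 3 L m hmlt, pvCnt_take_succ 4 L m hmlt]
      simp only [List.foldl_cons, List.foldl_nil, List.filter_cons, List.filter_nil,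
        List.flatMap_cons, List.flatMap_nil, List.append_nil]
      unfold pvStepA pvPairsAt
      rw [hgL, hgP]
      set c := L.getD m 0 with hc
      by_cases h1 : c = 1
      · simp [h1]
      by_cases h2 : c = 2
      · simp [h2]
      by_cases h3 : c = 3
      · simp [h3]
      by_cases h4 : c = 4
      · simp [h4]
      have hlt : c < 1 := by omega
      have : ¬ (1 ≤ c) := by omega
      simp [h1, h2, h3, h4, this, show ¬ (2 ≤ c) by omega, show ¬ (3 ≤ c) by omega, show ¬ (4 ≤ c) by omega]

-- ===== VERDICT (by name: the statement is the Claim_ definition above) =====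
theorem Match_data_pair_spec : Claim_equal_Match_data_pair := by
  intro text l s0 s1 s2 s3 _hdom _hpre
  unfold Spec_Match_data_pair Match_data_pair Match_data_pair_alt
  simp only []
  have hcap : ∀ x ∈ l.map (fun x : Int => if x > 4 then 4 else x), x ≤ 4 := by
    simp only [List.mem_map]
    rintro x ⟨y, -, rfl⟩
    split_ifs <;> omega
  have hlen : (l.map (fun x : Int => if x > 4 then 4 else x)).length = l.length := by simp
  rw [pvPreStep_foldl]
  simp only [List.nil_append]
  rw [show ((l.length : Int)) = (((l.map (fun x : Int => if x > 4 then 4 else x)).length : Nat) : Int) by simp]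
  rw [pvMain _ s0 s1 s2 s3 hcap _ (le_refl _)]
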